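-- pv_equiv track=rewrite | github.com/chboishabba/FRACDASH | scripts/freeze_monster10walk_canonical.py | best_hamiltonian_path
-- ===== SOURCE A (Python) =====
-- from functools import lru_cache
--
-- def best_hamiltonian_path(n: int, edges: list[tuple[int, int]]) -> tuple[list[int], int]:
--     edge_set = set(edges)
--     neg_inf = -10**9
--
--     @lru_cache(maxsize=None)
--     def dp(mask: int, last: int) -> tuple[int, tuple[int, ...]]:
--         if mask == (1 << last):
--             return (0, (last,))
--         best_score = neg_inf
--         best_path: tuple[int, ...] = ()
--         prev_mask = mask & ~(1 << last)
--         for prev in range(n):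
--             if prev == last or ((prev_mask >> prev) & 1) == 0:
--                 continue
--             score_prev, path_prev = dp(prev_mask, prev)
--             add = 1 if (prev, last) in edge_set else 0
--             score = score_prev + add
--             if score > best_score:
--                 best_score = score
--                 best_path = path_prev + (last,)
--         return (best_score, best_path)
--
--     full = (1 << n) - 1
--     best_score = neg_inf
--     best_path: tuple[int, ...] = ()
--     for last in range(n):
--         score, path = dp(full, last)
--         if score > best_score:
--             best_score = score
--             best_path = path
--     return list(best_path), int(best_score)
-- ===== SOURCE B (Python) =====
-- def best_hamiltonian_path(n: int, edges: list[tuple[int, int]]) -> tuple[list[int], int]: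
--     edge_set = set(edges)
--     neg_inf = -10**9
--     full = (1 << n) - 1
--     dp = {}  # (mask, last) -> (score, path), filled bottom-up in increasing mask order
--     for mask in range(1, full + 1):
--         for last in range(n):
--             if not (mask >> last) & 1:
--                 continue
--             if mask == (1 << last):
--                 dp[(mask, last)] = (0, (last,))
--                 continue
--             pm = mask ^ (1 << last)
--             best_score, best_path = neg_inf, ()
--             for prev in range(n):
--                 if prev == last or not (pm >> prev) & 1:
--                     continue
--                 s, p = dp[(pm, prev)]
--                 s += 1 if (prev, last) in edge_set else 0
--                 if s > best_score:
--                     best_score, best_path = s, p + (last,)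
--             dp[(mask, last)] = (best_score, best_path)
--     best_score, best_path = neg_inf, ()
--     for last in range(n):
--         s, p = dp[(full, last)]
--         if s > best_score:
--             best_score, best_path = s, p
--     return list(best_path), int(best_score)
-- ===== Notes on version B (the rewrite author's own statement) =====
-- stated objective: alternative
-- what changed: Replaces A's lru_cache-memoized top-down recursion with an explicit bottom-up DP: a dict keyed by (mask,last) filled by iterating masks in increasing order, with identical strict-> tie-breaking and the same -10**9 sentinel.
import Mathlib
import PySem

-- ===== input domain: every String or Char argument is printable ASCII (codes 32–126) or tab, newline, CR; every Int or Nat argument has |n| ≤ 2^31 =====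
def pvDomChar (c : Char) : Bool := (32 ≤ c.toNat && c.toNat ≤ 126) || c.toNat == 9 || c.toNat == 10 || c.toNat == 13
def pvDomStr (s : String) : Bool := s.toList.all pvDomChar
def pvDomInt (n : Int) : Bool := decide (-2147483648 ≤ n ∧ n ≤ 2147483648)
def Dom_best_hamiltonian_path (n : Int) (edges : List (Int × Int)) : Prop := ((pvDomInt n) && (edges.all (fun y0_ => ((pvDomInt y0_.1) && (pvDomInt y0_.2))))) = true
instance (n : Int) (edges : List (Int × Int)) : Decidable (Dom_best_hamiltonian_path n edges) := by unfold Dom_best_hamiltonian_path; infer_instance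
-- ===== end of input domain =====

-- B replaces A's memoized top-down recursion by a bottom-up iterative bitmask-DP table
-- filled in increasing mask order (objective: alternative decomposition, same asymptotic cost).

-- ===== PORT A =====
def pvNegInf : Int := -(10 ^ 9)

-- A's inner `dp(mask, last)`: the `@lru_cache` is ported as an explicit memo map
-- threaded through the recursion (checked before computing, written after, exactly
-- like lru_cache).  `fuel` is ONLY a totality guard: every call A makes has
-- fuel ≥ mask > prev_mask, so the fuel-exhaustion branch is never reached.
def pvDpAMemo (nN : Nat) (edges : List (Int × Int)) :
    Nat → Nat → Nat → Std.HashMap (Nat × Nat) (Int × List Int) →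
    (Int × List Int) × Std.HashMap (Nat × Nat) (Int × List Int)
  | fuel, mask, last, memo =>
    match memo[(mask, last)]? with
    | some v => (v, memo)
    | none =>
      let rm :=
        if mask = 1 <<< last then ((0, [(last : Int)]), memo)
        else match fuel with
        | 0 => ((pvNegInf, ([] : List Int)), memo)
        | f + 1 =>
          -- prev_mask = mask & ~(1 << last): clears bit `last` (exact for nonnegative masks)
          let pm := if mask.testBit last then mask ^^^ (1 <<< last) else mask
          (List.range nN).foldl
            (fun (am : (Int × List Int) × Std.HashMap (Nat × Nat) (Int × List Int)) prev =>
              if prev = last then am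
              else if pm.testBit prev = false then am
              else
                let rm' := pvDpAMemo nN edges f pm prev am.2
                let add : Int := if ((prev : Int), (last : Int)) ∈ edges then 1 else 0
                let s := rm'.1.1 + add
                ((if s > am.1.1 then (s, rm'.1.2 ++ [(last : Int)]) else am.1), rm'.2))
            ((pvNegInf, ([] : List Int)), memo)
      (rm.1, rm.2.insert (mask, last) rm.1)

def best_hamiltonian_path (n : Int) (edges : List (Int × Int)) : List Int × Int :=
  let nN := n.toNat
  let full := (1 <<< nN) - 1
  let bm := (List.range nN).foldl
      (fun (am : (Int × List Int) × Std.HashMap (Nat × Nat) (Int × List Int)) last =>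
        let rm := pvDpAMemo nN edges full full last am.2
        ((if rm.1.1 > am.1.1 then rm.1 else am.1), rm.2))
      ((pvNegInf, ([] : List Int)), (∅ : Std.HashMap (Nat × Nat) (Int × List Int)))
  (bm.1.2, bm.1.1)

-- ===== PORT B =====
def pvNegInfB : Int := -(10 ^ 9)

-- B's inner `for prev in range(n)` scan, reading the already-filled table
def pvInnerB (nN : Nat) (edges : List (Int × Int))
    (d : Std.HashMap (Nat × Nat) (Int × List Int)) (mask last : Nat) : Int × List Int :=
  let pm := mask ^^^ (1 <<< last)
  (List.range nN).foldl (fun (acc : Int × List Int) prev =>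
    if prev = last then acc
    else if pm.testBit prev = false then acc
    else
      let r := d.getD (pm, prev) (pvNegInfB, [])
      let s := r.1 + (if ((prev : Int), (last : Int)) ∈ edges then (1 : Int) else 0)
      if s > acc.1 then (s, r.2 ++ [(last : Int)]) else acc) (pvNegInfB, [])

-- body of B's `for mask in range(1, full+1)` loop
def pvProcMask (nN : Nat) (edges : List (Int × Int))
    (d : Std.HashMap (Nat × Nat) (Int × List Int)) (mask : Nat) :
    Std.HashMap (Nat × Nat) (Int × List Int) :=
  (List.range nN).foldl (fun d last =>
    if mask.testBit last = false then d
    else if mask = 1 <<< last then d.insert (mask, last) (0, [(last : Int)])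
    else d.insert (mask, last) (pvInnerB nN edges d mask last)) d

def best_hamiltonian_path_alt (n : Int) (edges : List (Int × Int)) : List Int × Int :=
  let nN := n.toNat
  let full := (1 <<< nN) - 1
  let dp := (List.range full).foldl (fun d mi => pvProcMask nN edges d (mi + 1))
      (∅ : Std.HashMap (Nat × Nat) (Int × List Int))
  let best := (List.range nN).foldl (fun (acc : Int × List Int) last =>
      let r := dp.getD (full, last) (pvNegInfB, [])
      if r.1 > acc.1 then r else acc) (pvNegInfB, [])
  (best.2, best.1)

-- ===== PRECONDITION & SPEC =====
-- Python A raises ValueError ("negative shift count", from `1 << n`) when n < 0; only that is excluded.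
def Pre_best_hamiltonian_path (n : Int) (edges : List (Int × Int)) : Prop := 0 ≤ n
instance (n : Int) (edges : List (Int × Int)) : Decidable (Pre_best_hamiltonian_path n edges) := by unfold Pre_best_hamiltonian_path; infer_instance
def pvWitness_best_hamiltonian_path : Int × (List (Int × Int)) := (3, [(0, 1), (1, 2)])

def Spec_best_hamiltonian_path (n : Int) (edges : List (Int × Int)) (out : List Int × Int) : Prop := out = best_hamiltonian_path_alt n edges
instance (n : Int) (edges : List (Int × Int)) (out : List Int × Int) : Decidable (Spec_best_hamiltonian_path n edges out) := by unfold Spec_best_hamiltonian_path; infer_instance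

-- ===== CLAIM (what is proved, stated in full; the proofs are below) =====
def Claim_equal_best_hamiltonian_path : Prop := ∀ (n : Int) (edges : List (Int × Int)), Dom_best_hamiltonian_path n edges → Pre_best_hamiltonian_path n edges → Spec_best_hamiltonian_path n edges (best_hamiltonian_path n edges)

-- ===== LEMMAS AND PROOFS =====

-- pure (memo-free) reference version of A's dp; both ports are proved equal to it
def pvDpA (nN : Nat) (edges : List (Int × Int)) (fuel mask last : Nat) : Int × List Int :=
  if mask = 1 <<< last then (0, [(last : Int)])
  else match fuel with
  | 0 => (pvNegInf, [])
  | f + 1 =>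
    let pm := if mask.testBit last then mask ^^^ (1 <<< last) else mask
    (List.range nN).foldl (fun (acc : Int × List Int) prev =>
      if prev = last then acc
      else if pm.testBit prev = false then acc
      else
        let r := pvDpA nN edges f pm prev
        let s := r.1 + (if ((prev : Int), (last : Int)) ∈ edges then (1 : Int) else 0)
        if s > acc.1 then (s, r.2 ++ [(last : Int)]) else acc)
      (pvNegInf, [])

def pvA (nN : Nat) (edges : List (Int × Int)) (mask last : Nat) : Int × List Int :=
  pvDpA nN edges mask mask last

-- the body of dp's `for prev` loop with the recursive call replaced by its value
def pvRefStep (nN : Nat) (edges : List (Int × Int)) (mask last : Nat)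
    (acc : Int × List Int) (prev : Nat) : Int × List Int :=
  if prev = last then acc
  else if (mask ^^^ (1 <<< last)).testBit prev = false then acc
  else
    let r := pvA nN edges (mask ^^^ (1 <<< last)) prev
    let s := r.1 + (if ((prev : Int), (last : Int)) ∈ edges then (1 : Int) else 0)
    if s > acc.1 then (s, r.2 ++ [(last : Int)]) else acc

theorem pvClearBit_lt (m l : Nat) (h : m.testBit l = true) : m ^^^ (1 <<< l) < m := by
  have hp : (1 <<< l) = 2 ^ l := by simp [Nat.shiftLeft_eq]
  apply Nat.lt_of_testBit l
  · simp [Nat.testBit_xor, h, hp]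
  · exact h
  · intro j hj
    simp [Nat.testBit_xor, hp, (Nat.ne_of_lt hj)]

theorem pvDpA_fuel_irrel (nN : Nat) (edges : List (Int × Int)) :
    ∀ mask f1 f2 last, mask ≤ f1 → mask ≤ f2 → mask.testBit last = true →
      pvDpA nN edges f1 mask last = pvDpA nN edges f2 mask last := by
  intro mask
  induction mask using Nat.strong_induction_on with
  | _ mask ih =>
    intro f1 f2 last h1 h2 hbit
    by_cases hb : mask = 1 <<< last
    · rw [pvDpA.eq_def, pvDpA.eq_def]; simp [hb]
    · have hge : 1 ≤ mask := le_trans (Nat.one_le_two_pow) (Nat.ge_two_pow_of_testBit hbit)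
      obtain ⟨g1, rfl⟩ : ∃ g, f1 = g + 1 := ⟨f1 - 1, by omega⟩
      obtain ⟨g2, rfl⟩ : ∃ g, f2 = g + 1 := ⟨f2 - 1, by omega⟩
      rw [pvDpA.eq_def, pvDpA.eq_def]
      simp only [hb, if_false, hbit, if_true]
      apply PySem.List.foldl_congr_mem
      intro acc prev hmem
      by_cases hpl : prev = last
      · simp [hpl]
      · simp only [hpl, if_false]
        by_cases hpb : (mask ^^^ (1 <<< last)).testBit prev = false
        · simp [hpb]
        · simp only [hpb]
          have hlt := pvClearBit_lt mask last hbit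
          rw [ih _ hlt g1 g2 prev (by omega) (by omega) (by simpa using hpb)]

-- unfolding pvA one level, with the recursive calls replaced by pvA values
theorem pvA_unfold (nN : Nat) (edges : List (Int × Int)) (mask last : Nat)
    (hbit : mask.testBit last = true) (hnb : mask ≠ 1 <<< last) :
    pvA nN edges mask last =
      (List.range nN).foldl (pvRefStep nN edges mask last) (pvNegInf, []) := by
  have hge : 1 ≤ mask := le_trans (Nat.one_le_two_pow) (Nat.ge_two_pow_of_testBit hbit)
  obtain ⟨g, rfl⟩ : ∃ g, mask = g + 1 := ⟨mask - 1, by omega⟩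
  rw [pvA, pvDpA.eq_def]
  simp only [hnb, if_false, hbit, if_true]
  apply PySem.List.foldl_congr_mem
  intro acc prev hmem
  rw [pvRefStep]
  by_cases hpl : prev = last
  · simp [hpl]
  · simp only [hpl, if_false]
    by_cases hpb : ((g + 1) ^^^ (1 <<< last)).testBit prev = false
    · simp [hpb]
    · simp only [hpb]
      have hlt := pvClearBit_lt (g + 1) last hbit
      have hpbt : ((g + 1) ^^^ (1 <<< last)).testBit prev = true := by simpa using hpb
      rw [pvA, pvDpA_fuel_irrel nN edges _ g _ prev (by omega) (le_refl _) hpbt]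

-- ---- A side: the threaded memo map only ever holds correct dp values ----

def pvW (nN : Nat) (edges : List (Int × Int))
    (memo : Std.HashMap (Nat × Nat) (Int × List Int)) : Prop :=
  ∀ mask last v, memo[(mask, last)]? = some v →
    mask.testBit last = true ∧ v = pvA nN edges mask last

theorem pvW_empty (nN : Nat) (edges : List (Int × Int)) :
    pvW nN edges (∅ : Std.HashMap (Nat × Nat) (Int × List Int)) := by
  intro mask last v h
  rw [Std.HashMap.getElem?_empty] at h
  cases h

theorem pvW_insert (nN : Nat) (edges : List (Int × Int))
    (memo : Std.HashMap (Nat × Nat) (Int × List Int)) (mask last : Nat)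
    (v : Int × List Int) (hW : pvW nN edges memo)
    (hbit : mask.testBit last = true) (hv : v = pvA nN edges mask last) :
    pvW nN edges (memo.insert (mask, last) v) := by
  intro mask' last' v' h
  rw [Std.HashMap.getElem?_insert] at h
  by_cases hk : ((mask, last) == (mask', last')) = true
  · rw [if_pos hk] at h
    obtain ⟨h1, h2⟩ : mask = mask' ∧ last = last' := by simpa using hk
    cases h; subst h1; subst h2; exact ⟨hbit, hv⟩
  · rw [if_neg hk] at h
    exact hW mask' last' v' h

theorem pvDpAMemo_correct (nN : Nat) (edges : List (Int × Int)) :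
    ∀ mask fuel last memo, mask ≤ fuel → mask.testBit last = true →
      pvW nN edges memo →
      (pvDpAMemo nN edges fuel mask last memo).1 = pvA nN edges mask last ∧
      pvW nN edges (pvDpAMemo nN edges fuel mask last memo).2 := by
  intro mask
  induction mask using Nat.strong_induction_on with
  | _ mask ih =>
    intro fuel last memo hle hbit hW
    rw [pvDpAMemo.eq_def]
    cases hhit : memo[(mask, last)]? with
    | some v =>
      simp only [hhit]
      exact ⟨(hW mask last v hhit).2, hW⟩
    | none =>
      simp only [hhit]
      by_cases hb : mask = 1 <<< last
      · rw [if_pos hb]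
        have hval : ((0 : Int), [(last : Int)]) = pvA nN edges mask last := by
          rw [pvA, pvDpA.eq_def]; simp [hb]
        exact ⟨hval, by
          subst hb
          exact pvW_insert nN edges memo _ last _ hW hbit hval⟩
      · have hge : 1 ≤ mask := le_trans (Nat.one_le_two_pow) (Nat.ge_two_pow_of_testBit hbit)
        obtain ⟨f, rfl⟩ : ∃ g, fuel = g + 1 := ⟨fuel - 1, by omega⟩
        simp only [hb, if_false, hbit, if_true]
        have hlt := pvClearBit_lt mask last hbit
        -- the inner fold: accumulator equals the pure fold, memo stays correct
        have hfold : ∀ (L : List Nat) (acc : Int × List Int)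
            (m0 : Std.HashMap (Nat × Nat) (Int × List Int)), pvW nN edges m0 →
            (L.foldl (fun (am : (Int × List Int) × Std.HashMap (Nat × Nat) (Int × List Int)) prev =>
              if prev = last then am
              else if (mask ^^^ (1 <<< last)).testBit prev = false then am
              else
                let rm' := pvDpAMemo nN edges f (mask ^^^ (1 <<< last)) prev am.2
                let add : Int := if ((prev : Int), (last : Int)) ∈ edges then 1 else 0
                let s := rm'.1.1 + add
                ((if s > am.1.1 then (s, rm'.1.2 ++ [(last : Int)]) else am.1), rm'.2))
              (acc, m0)).1 = L.foldl (pvRefStep nN edges mask last) acc ∧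
            pvW nN edges (L.foldl (fun (am : (Int × List Int) × Std.HashMap (Nat × Nat) (Int × List Int)) prev =>
              if prev = last then am
              else if (mask ^^^ (1 <<< last)).testBit prev = false then am
              else
                let rm' := pvDpAMemo nN edges f (mask ^^^ (1 <<< last)) prev am.2
                let add : Int := if ((prev : Int), (last : Int)) ∈ edges then 1 else 0
                let s := rm'.1.1 + add
                ((if s > am.1.1 then (s, rm'.1.2 ++ [(last : Int)]) else am.1), rm'.2))
              (acc, m0)).2 := by
          intro L
          induction L with
          | nil => intro acc m0 hm0; exact ⟨rfl, hm0⟩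
          | cons p L IHL =>
            intro acc m0 hm0
            rw [List.foldl_cons, List.foldl_cons, pvRefStep]
            by_cases hpl : p = last
            · simp only [hpl, if_true]
              exact IHL acc m0 hm0
            · simp only [hpl, if_false]
              by_cases hpb : (mask ^^^ (1 <<< last)).testBit p = false
              · simp only [hpb, if_true]
                exact IHL acc m0 hm0
              · simp only [hpb, if_false]
                have hpbt : (mask ^^^ (1 <<< last)).testBit p = true := by simpa using hpb
                obtain ⟨hv, hm1⟩ := ih _ hlt f p m0 (by omega) hpbt hm0
                rw [hv]
                exact IHL _ _ hm1
        obtain ⟨hv, hm⟩ := hfold (List.range nN) (pvNegInf, []) memo hW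
        rw [hv]
        refine ⟨?_, ?_⟩
        · rw [pvA_unfold nN edges mask last hbit hb]
        · apply pvW_insert nN edges _ mask last _ hm hbit
          rw [pvA_unfold nN edges mask last hbit hb]

-- ---- B side: the bottom-up table holds exactly the dp values of the masks filled so far ----

theorem pvInnerB_correct (nN : Nat) (edges : List (Int × Int))
    (d : Std.HashMap (Nat × Nat) (Int × List Int)) (mask last : Nat)
    (hbit : mask.testBit last = true) (hnb : mask ≠ 1 <<< last)
    (hd : ∀ pm prev, 1 ≤ pm → pm < mask → pm.testBit prev = true →
      d[(pm, prev)]? = some (pvA nN edges pm prev)) :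
    pvInnerB nN edges d mask last = pvA nN edges mask last := by
  rw [pvA_unfold nN edges mask last hbit hnb, pvInnerB]
  apply PySem.List.foldl_congr_mem
  intro acc prev hmem
  rw [pvRefStep]
  by_cases hpl : prev = last
  · simp [hpl]
  · simp only [hpl, if_false]
    by_cases hpb : (mask ^^^ (1 <<< last)).testBit prev = false
    · simp [hpb]
    · simp only [hpb]
      have hpbt : (mask ^^^ (1 <<< last)).testBit prev = true := by simpa using hpb
      have hlt := pvClearBit_lt mask last hbit
      have hp1 : 1 ≤ mask ^^^ (1 <<< last) :=
        le_trans (Nat.one_le_two_pow) (Nat.ge_two_pow_of_testBit hpbt)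
      rw [Std.HashMap.getD_eq_getD_getElem?, hd _ _ hp1 hlt hpbt]
      simp [pvNegInfB]

theorem pvProcMask_inner (nN : Nat) (edges : List (Int × Int)) (m : Nat)
    (d : Std.HashMap (Nat × Nat) (Int × List Int))
    (hd : ∀ mask last, d[(mask, last)]? =
      if 1 ≤ mask ∧ mask ≤ m ∧ mask.testBit last = true
        then some (pvA nN edges mask last) else none) :
    ∀ k mask' last',
      ((List.range k).foldl (fun d last =>
        if (m + 1).testBit last = false then d
        else if m + 1 = 1 <<< last then d.insert (m + 1, last) (0, [(last : Int)])
        else d.insert (m + 1, last) (pvInnerB nN edges d (m + 1) last)) d)[(mask', last')]? =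
      if (1 ≤ mask' ∧ mask' ≤ m ∧ mask'.testBit last' = true) ∨
         (mask' = m + 1 ∧ last' < k ∧ mask'.testBit last' = true)
        then some (pvA nN edges mask' last') else none := by
  intro k
  induction k with
  | zero =>
    intro mask' last'
    simp only [List.range_zero, List.foldl_nil, hd]
    have h0 : (1 ≤ mask' ∧ mask' ≤ m ∧ mask'.testBit last' = true) ↔
        ((1 ≤ mask' ∧ mask' ≤ m ∧ mask'.testBit last' = true) ∨
         (mask' = m + 1 ∧ last' < 0 ∧ mask'.testBit last' = true)) := by
      constructor
      · exact Or.inl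
      · rintro (h | h)
        · exact h
        · exact absurd h.2.1 (Nat.not_lt_zero _)
    exact if_congr h0 rfl rfl
  | succ k IH =>
    intro mask' last'
    rw [List.range_succ, List.foldl_append, List.foldl_cons, List.foldl_nil]
    by_cases hbk : (m + 1).testBit k = false
    · simp only [hbk, if_true, IH]
      have h1 : ((1 ≤ mask' ∧ mask' ≤ m ∧ mask'.testBit last' = true) ∨
          (mask' = m + 1 ∧ last' < k ∧ mask'.testBit last' = true)) ↔
          ((1 ≤ mask' ∧ mask' ≤ m ∧ mask'.testBit last' = true) ∨
          (mask' = m + 1 ∧ last' < k + 1 ∧ mask'.testBit last' = true)) := by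
        constructor
        · rintro (h | h); exact Or.inl h; exact Or.inr ⟨h.1, by omega, h.2.2⟩
        · rintro (h | h); exact Or.inl h
          rcases h with ⟨he, hlt, hbit⟩
          refine Or.inr ⟨he, ?_, hbit⟩
          rcases Nat.lt_succ_iff_lt_or_eq.mp hlt with h | h
          · exact h
          · subst h; subst he; simp [hbit] at hbk
      rw [if_congr h1 rfl rfl]
    · have hbk' : (m + 1).testBit k = true := by simpa using hbk
      have hinserted : ∀ v, (v = pvA nN edges (m + 1) k) →
          (((List.range k).foldl (fun d last =>
            if (m + 1).testBit last = false then d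
            else if m + 1 = 1 <<< last then d.insert (m + 1, last) (0, [(last : Int)])
            else d.insert (m + 1, last) (pvInnerB nN edges d (m + 1) last)) d).insert (m + 1, k) v)[(mask', last')]? =
          if (1 ≤ mask' ∧ mask' ≤ m ∧ mask'.testBit last' = true) ∨
             (mask' = m + 1 ∧ last' < k + 1 ∧ mask'.testBit last' = true)
            then some (pvA nN edges mask' last') else none := by
        intro v hv
        rw [Std.HashMap.getElem?_insert]
        by_cases hk : ((m + 1, k) == (mask', last')) = true
        · obtain ⟨h1, h2⟩ : m + 1 = mask' ∧ k = last' := by simpa using hk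
          rw [if_pos hk, hv]
          subst h1; subst h2
          rw [if_pos (Or.inr ⟨rfl, by omega, hbk'⟩)]
        · rw [if_neg hk, IH]
          have hne : ¬(mask' = m + 1 ∧ last' = k) := by
            intro ⟨ha, hbq⟩; apply hk; subst ha; subst hbq; simp
          have h1 : ((1 ≤ mask' ∧ mask' ≤ m ∧ mask'.testBit last' = true) ∨
              (mask' = m + 1 ∧ last' < k ∧ mask'.testBit last' = true)) ↔
              ((1 ≤ mask' ∧ mask' ≤ m ∧ mask'.testBit last' = true) ∨
              (mask' = m + 1 ∧ last' < k + 1 ∧ mask'.testBit last' = true)) := by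
            constructor
            · rintro (h | h); exact Or.inl h; exact Or.inr ⟨h.1, by omega, h.2.2⟩
            · rintro (h | h); exact Or.inl h
              rcases h with ⟨he, hlt, hbit⟩
              refine Or.inr ⟨he, ?_, hbit⟩
              rcases Nat.lt_succ_iff_lt_or_eq.mp hlt with h | h
              · exact h
              · exact absurd ⟨he, h⟩ hne
          rw [if_congr h1 rfl rfl]
      simp only [hbk]
      by_cases hbase : m + 1 = 1 <<< k
      · rw [if_pos hbase]
        apply hinserted
        rw [pvA, pvDpA.eq_def]
        simp [hbase]
      · rw [if_neg hbase]
        apply hinserted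
        apply pvInnerB_correct nN edges _ (m + 1) k hbk' hbase
        intro pm prev h1 h2 h3
        rw [IH]
        rw [if_pos (Or.inl ⟨h1, by omega, h3⟩)]

theorem pvTable_inv (nN : Nat) (edges : List (Int × Int)) :
    ∀ m, m ≤ (1 <<< nN) - 1 → ∀ mask last,
      ((List.range m).foldl (fun d mi => pvProcMask nN edges d (mi + 1))
        (∅ : Std.HashMap (Nat × Nat) (Int × List Int)))[(mask, last)]? =
      if 1 ≤ mask ∧ mask ≤ m ∧ mask.testBit last = true
        then some (pvA nN edges mask last) else none := by
  intro m
  induction m with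
  | zero =>
    intro _ mask last
    rw [List.range_zero, List.foldl_nil, Std.HashMap.getElem?_empty, if_neg]
    rintro ⟨h1, h2, _⟩; omega
  | succ m IH =>
    intro hm mask last
    rw [List.range_succ, List.foldl_append, List.foldl_cons, List.foldl_nil,
      pvProcMask]
    rw [pvProcMask_inner nN edges m _ (IH (by omega)) nN mask last]
    have h1 : ((1 ≤ mask ∧ mask ≤ m ∧ mask.testBit last = true) ∨
        (mask = m + 1 ∧ last < nN ∧ mask.testBit last = true)) ↔
        (1 ≤ mask ∧ mask ≤ m + 1 ∧ mask.testBit last = true) := by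
      constructor
      · rintro (h | h)
        · exact ⟨h.1, by omega, h.2.2⟩
        · exact ⟨by omega, by omega, h.2.2⟩
      · rintro ⟨ha, hb, hc⟩
        by_cases hle : mask ≤ m
        · exact Or.inl ⟨ha, hle, hc⟩
        · have he : mask = m + 1 := by omega
          refine Or.inr ⟨he, ?_, hc⟩
          have hfull : (1 : Nat) <<< nN = 2 ^ nN := by simp [Nat.shiftLeft_eq]
          have hlt : mask < 2 ^ nN := by
            have : 1 ≤ 2 ^ nN := Nat.one_le_two_pow
            omega
          have hgep := Nat.ge_two_pow_of_testBit hc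
          have hplt : (2 : Nat) ^ last < 2 ^ nN := by omega
          exact (Nat.pow_lt_pow_iff_right (by omega)).mp hplt
    rw [if_congr h1 rfl rfl]

-- ---- both ports equal the same reference fold over `last in range(n)` ----

theorem pvPortsEq (n : Int) (edges : List (Int × Int)) :
    best_hamiltonian_path n edges = best_hamiltonian_path_alt n edges := by
  simp only [best_hamiltonian_path, best_hamiltonian_path_alt]
  have hfull : (1 : Nat) <<< n.toNat = 2 ^ n.toNat := by simp [Nat.shiftLeft_eq]
  have hbitfull : ∀ last, last < n.toNat → ((1 <<< n.toNat) - 1).testBit last = true := by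
    intro last hl
    rw [hfull]
    simp [Nat.testBit_two_pow_sub_one, hl]
  -- A's final loop: accumulator equals the pure reference fold
  have hA : ∀ (L : List Nat) (acc : Int × List Int)
      (m0 : Std.HashMap (Nat × Nat) (Int × List Int)), pvW n.toNat edges m0 →
      (∀ l ∈ L, l < n.toNat) →
      (L.foldl (fun (am : (Int × List Int) × Std.HashMap (Nat × Nat) (Int × List Int)) last =>
        let rm := pvDpAMemo n.toNat edges ((1 <<< n.toNat) - 1) ((1 <<< n.toNat) - 1) last am.2
        ((if rm.1.1 > am.1.1 then rm.1 else am.1), rm.2)) (acc, m0)).1 =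
      L.foldl (fun (acc : Int × List Int) last =>
        let r := pvA n.toNat edges ((1 <<< n.toNat) - 1) last
        if r.1 > acc.1 then r else acc) acc := by
    intro L
    induction L with
    | nil => intro acc m0 _ _; rfl
    | cons l L IHL =>
      intro acc m0 hm0 hmem
      rw [List.foldl_cons, List.foldl_cons]
      obtain ⟨hv, hm1⟩ := pvDpAMemo_correct n.toNat edges ((1 <<< n.toNat) - 1)
        ((1 <<< n.toNat) - 1) l m0 (le_refl _) (hbitfull l (hmem l (by simp))) hm0
      simp only [hv]
      exact IHL _ _ hm1 (fun x hx => hmem x (by simp [hx]))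
  rw [hA (List.range n.toNat) (pvNegInf, []) _ (pvW_empty n.toNat edges)
    (fun l hl => List.mem_range.mp hl)]
  -- B's final loop reads pvA values from the finished table
  have hB : (List.range n.toNat).foldl (fun (acc : Int × List Int) last =>
      let r := ((List.range ((1 <<< n.toNat) - 1)).foldl
          (fun d mi => pvProcMask n.toNat edges d (mi + 1))
          (∅ : Std.HashMap (Nat × Nat) (Int × List Int))).getD
          ((1 <<< n.toNat) - 1, last) (pvNegInfB, [])
      if r.1 > acc.1 then r else acc) (pvNegInfB, []) =
    (List.range n.toNat).foldl (fun (acc : Int × List Int) last =>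
      let r := pvA n.toNat edges ((1 <<< n.toNat) - 1) last
      if r.1 > acc.1 then r else acc) (pvNegInfB, []) := by
    apply PySem.List.foldl_congr_mem
    intro acc last hmem
    rw [List.mem_range] at hmem
    have h2 : (2 : Nat) ≤ 2 ^ n.toNat := by
      calc (2 : Nat) = 2 ^ 1 := rfl
      _ ≤ 2 ^ n.toNat := Nat.pow_le_pow_right (by omega) (by omega)
    have hc : 1 ≤ (1 <<< n.toNat) - 1 ∧ (1 <<< n.toNat) - 1 ≤ (1 <<< n.toNat) - 1 ∧
        ((1 <<< n.toNat) - 1).testBit last = true :=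
      ⟨by omega, le_refl _, hbitfull last hmem⟩
    rw [Std.HashMap.getD_eq_getD_getElem?,
      pvTable_inv n.toNat edges _ (le_refl _) _ last, if_pos hc]
    rfl
  rw [hB]
  rfl

-- ===== VERDICT (by name: the statement is the Claim_ definition above) =====
theorem best_hamiltonian_path_spec : Claim_equal_best_hamiltonian_path := by
  intro n edges _ _
  unfold Spec_best_hamiltonian_path
  exact pvPortsEq n edges
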